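-- pv_equiv track=rewrite | github.com/CodeWithPraTech/SVP-Product-NBA-Analysis-using-BDD | nba_functions.py | dfs_reachable_states_iterative
-- ===== SOURCE A (Python) =====
-- def dfs_reachable_states_iterative(initial_states, transitions):
--     visited = set()
--     reachable_transitions = {}
--
--     # Use a stack to replace the recursion
--     stack = list(initial_states)
--
--     while stack:
--         state = stack.pop()
--
--         if state in visited:
--             continue
--
--         visited.add(state)
--
--         if state not in transitions:
--             continue
--
--         reachable_transitions[state] = transitions[state]
--
--         for symbol in transitions[state]:
--             for next_state in transitions[state][symbol]:
--                 if next_state not in visited: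
--                     stack.append(next_state)
--
--     return visited, reachable_transitions
-- ===== SOURCE B (Python) =====
-- def dfs_reachable_states_iterative(initial_states, transitions):
--     visited = set()
--     reachable_transitions = {}
--
--     # Recursive decomposition: one visit(state) activation per state.  Each
--     # activation is a generator that yields its child activations, and drive()
--     # runs an activation to completion (a trampoline), so arbitrarily deep
--     # recursion cannot hit the interpreter's recursion limit.
--     def visit(state):
--         if state in visited:
--             return
--         visited.add(state)
--         if state not in transitions:
--             return
--         reachable_transitions[state] = transitions[state]
--         for symbol in reversed(transitions[state]):
--             for next_state in reversed(transitions[state][symbol]):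
--                 yield visit(next_state)
--
--     def drive(activation):
--         pending = [activation]
--         while pending:
--             child = next(pending[-1], None)
--             if child is None:
--                 pending.pop()
--             else:
--                 pending.append(child)
--
--     for state in reversed(initial_states):
--         drive(visit(state))
--
--     return visited, reachable_transitions
-- ===== Notes on version B (the rewrite author's own statement) =====
-- stated objective: alternative
-- what changed: the explicit-stack while loop with push-time visited filtering is replaced by a recursive visit(state) helper (one activation per state, run via a generator trampoline so deep graphs cannot overflow the recursion limit), iterating initial states and successors in reversed order so the visitation order is identical
import Mathlib
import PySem

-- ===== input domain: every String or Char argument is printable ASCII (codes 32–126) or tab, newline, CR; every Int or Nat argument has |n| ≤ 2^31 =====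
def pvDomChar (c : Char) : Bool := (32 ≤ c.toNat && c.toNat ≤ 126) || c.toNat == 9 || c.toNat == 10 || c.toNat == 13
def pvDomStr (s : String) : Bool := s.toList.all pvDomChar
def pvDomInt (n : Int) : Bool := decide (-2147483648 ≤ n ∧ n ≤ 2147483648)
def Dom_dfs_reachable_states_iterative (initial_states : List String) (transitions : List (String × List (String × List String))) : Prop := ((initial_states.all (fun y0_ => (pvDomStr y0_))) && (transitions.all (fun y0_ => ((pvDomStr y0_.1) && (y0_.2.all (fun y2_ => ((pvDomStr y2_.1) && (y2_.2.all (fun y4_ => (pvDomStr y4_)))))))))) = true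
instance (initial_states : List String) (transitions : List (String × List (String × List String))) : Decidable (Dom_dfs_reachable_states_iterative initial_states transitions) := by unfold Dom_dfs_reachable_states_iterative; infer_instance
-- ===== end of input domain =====

-- B replaces A's explicit-stack loop by a recursive visit() helper, iterating initial
-- states and successors in reversed order, so the visitation order is identical.
-- (visited is a Python set and reachable_transitions a dict; the returned values are
-- compared as a set / a dict, and the ports reproduce their insertion orders exactly.)

-- ===== PORT A =====
-- total number of successor occurrences in the transition table (termination measure part)
def pvT (transitions : List (String × List (String × List String))) : Nat :=
  (transitions.flatMap (fun p => p.2.flatMap (fun q => q.2))).length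

-- number of transition keys not yet visited (termination measure part)
def pvUnv (transitions : List (String × List (String × List String))) (v : PySem.Set String) : Nat :=
  ((transitions.map (fun p => p.1)).filter (fun k => !(PySem.Set.contains v k))).length

-- the inner double loop of A appends exactly the not-yet-visited successors, in order
theorem pv_inner_push (c : String → Bool) :
    ∀ (l : List String) (st : List String),
      l.foldl (fun st n => if c n then st else st ++ [n]) st
        = st ++ l.filter (fun n => !(c n)) := by
  intro l
  induction l with
  | nil => simp
  | cons a l ih =>
      intro st
      cases hc : c a <;> simp [hc, ih, List.append_assoc]

theorem pv_push_eq (c : String → Bool) :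
    ∀ (tr : List (String × List String)) (rest : List String),
      tr.foldl (fun st p => p.2.foldl (fun st n => if c n then st else st ++ [n]) st) rest
        = rest ++ (tr.flatMap (fun p => p.2)).filter (fun n => !(c n)) := by
  intro tr
  induction tr with
  | nil => simp
  | cons p tr ih =>
      intro rest
      rw [List.foldl_cons, pv_inner_push, ih, List.append_assoc, List.flatMap_cons,
        List.filter_append]

theorem pv_filter_len_mono {α : Type} (p q : α → Bool) (h : ∀ x, p x = true → q x = true) :
    ∀ l : List α, (l.filter p).length ≤ (l.filter q).length := by
  intro l
  induction l with
  | nil => simp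
  | cons a l ih =>
      by_cases hp : p a = true
      · simp [hp, h a hp]; omega
      · simp only [Bool.not_eq_true] at hp
        by_cases hq : q a = true
        · simp [hp, hq]; omega
        · simp only [Bool.not_eq_true] at hq
          simp [hp, hq, ih]

theorem pvUnv_le_of_subset (transitions : List (String × List (String × List String)))
    (v w : PySem.Set String) (h : ∀ x, x ∈ v → x ∈ w) :
    pvUnv transitions w ≤ pvUnv transitions v := by
  apply pv_filter_len_mono
  intro x hx
  simp only [PySem.Set.contains_eq_listContains, Bool.not_eq_true', List.contains_eq_mem,
    decide_eq_false_iff_not] at hx ⊢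
  intro hv
  exact hx (h x hv)

theorem pvUnv_add_le (transitions : List (String × List (String × List String)))
    (v : PySem.Set String) (s : String) :
    pvUnv transitions (PySem.Set.add v s) ≤ pvUnv transitions v := by
  apply pvUnv_le_of_subset
  intro x hx
  exact (PySem.Set.mem_add _ _ _).2 (Or.inl hx)

theorem pv_filter_len_lt_gen {α : Type} (p q : α → Bool)
    (himp : ∀ x, p x = true → q x = true) (s : α) (hp : p s = false) (hq : q s = true) :
    ∀ l : List α, s ∈ l → (l.filter p).length < (l.filter q).length := by
  intro l
  induction l with
  | nil => simp
  | cons a l ih =>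
      intro hmem
      rcases List.mem_cons.1 hmem with h | h
      · subst h
        rw [List.filter_cons, List.filter_cons, if_neg (by simp [hp]), if_pos (by simp [hq])]
        exact Nat.lt_succ_of_le (pv_filter_len_mono p q himp l)
      · have hlt := ih h
        simp only [List.filter_cons]
        cases hpa : p a
        · cases hqa : q a <;> simp <;> omega
        · have := himp a hpa
          simp [this]
          omega

theorem pvUnv_add_lt (transitions : List (String × List (String × List String)))
    (v : PySem.Set String) (s : String)
    (hs : PySem.Set.contains v s = false) (hk : s ∈ transitions.map (fun p => p.1)) :
    pvUnv transitions (PySem.Set.add v s) < pvUnv transitions v := by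
  apply pv_filter_len_lt_gen
  · intro x hx
    simp only [PySem.Set.contains_eq_listContains, Bool.not_eq_true',
      List.contains_eq_mem, decide_eq_false_iff_not] at hx ⊢
    intro hv
    exact hx ((PySem.Set.mem_add _ _ _).2 (Or.inl hv))
  · show (!(PySem.Set.contains (PySem.Set.add v s) s)) = false
    have : PySem.Set.contains (PySem.Set.add v s) s = true := by
      simp only [PySem.Set.contains_eq_listContains, List.contains_eq_mem, decide_eq_true_eq]
      exact (PySem.Set.mem_add _ _ _).2 (Or.inr rfl)
    rw [this]
    rfl
  · show (!(PySem.Set.contains v s)) = true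
    rw [hs]
    rfl
  · exact hk

theorem pv_key_mem (s : String) :
    ∀ (transitions : List (String × List (String × List String)))
      (tr : List (String × List String)),
      (PySem.Dict.mk transitions).get? s = some tr →
      s ∈ transitions.map (fun p => p.1) ∧ (tr.flatMap (fun q => q.2)).length ≤ pvT transitions := by
  intro transitions
  induction transitions with
  | nil => intro tr h; simp [PySem.Dict.get?] at h
  | cons p rest ih =>
      intro tr h
      rw [PySem.Dict.get?_mk_cons] at h
      by_cases hpk : p.1 == s
      · rw [if_pos hpk] at h
        have hk : p.1 = s := by simpa using hpk
        have htr : p.2 = tr := by simpa using h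
        constructor
        · simp [← hk]
        · subst htr
          simp only [pvT, List.flatMap_cons, List.length_append]
          omega
      · rw [if_neg hpk] at h
        obtain ⟨h1, h2⟩ := ih tr h
        constructor
        · simp [h1]
        · simp only [pvT, List.flatMap_cons, List.length_append] at *
          omega

theorem pv_getLast?_ne_nil {α : Type} (stack : List α) (s : α)
    (h : stack.getLast? = some s) : stack ≠ [] := by
  intro hnil; subst hnil; simp at h

theorem pv_dec2 (T u u' L : Nat) (h1 : u' ≤ u) (hL : 0 < L) :
    (T + 1) * u' + (L - 1) < (T + 1) * u + L := by
  have h2 := Nat.mul_le_mul_left (T + 1) h1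
  omega

theorem pv_dec3 (T u u' F L : Nat) (h1 : u' + 1 ≤ u) (hF : F ≤ T) (hL : 0 < L) :
    (T + 1) * u' + (L - 1 + F) < (T + 1) * u + L := by
  have h2 : (T + 1) * (u' + 1) ≤ (T + 1) * u := Nat.mul_le_mul_left _ h1
  have h3 : (T + 1) * (u' + 1) = (T + 1) * u' + (T + 1) := by ring
  omega

-- the port of A's while-loop: visited, reachable_transitions, stack
def dfsLoopA (transitions : List (String × List (String × List String))) :
    PySem.Set String → PySem.Dict String (List (String × List String)) → List String →
    PySem.Set String × PySem.Dict String (List (String × List String)) := fun v rt stack =>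
  match h : stack.getLast? with
  | none => (v, rt)
  | some s =>
    let rest := stack.dropLast
    if PySem.Set.contains v s then
      dfsLoopA transitions v rt rest
    else
      let v' := PySem.Set.add v s
      match hg : (PySem.Dict.mk transitions).get? s with
      | none => dfsLoopA transitions v' rt rest
      | some tr =>
        let rt' := rt.insert s tr
        let stack' := tr.foldl
          (fun st p => p.2.foldl
            (fun st n => if PySem.Set.contains v' n then st else st ++ [n]) st) rest
        dfsLoopA transitions v' rt' stack'
termination_by v rt stack => (pvT transitions + 1) * pvUnv transitions v + stack.length
decreasing_by
  · have := List.length_pos_of_ne_nil (pv_getLast?_ne_nil _ s h)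
    simp only [List.length_dropLast]
    omega
  · simp only [List.length_dropLast]
    exact pv_dec2 _ _ _ _ (pvUnv_add_le transitions _ s)
      (List.length_pos_of_ne_nil (pv_getLast?_ne_nil _ s h))
  · rename_i hcon
    obtain ⟨hk, hT⟩ := pv_key_mem s transitions tr hg
    simp only [dite_eq_ite, pv_push_eq, List.length_append, List.length_dropLast]
    exact pv_dec3 _ _ _ _ _ (pvUnv_add_lt transitions _ s (by simpa using hcon) hk)
      (le_trans (List.length_filter_le _ _) hT)
      (List.length_pos_of_ne_nil (pv_getLast?_ne_nil _ s h))

def dfs_reachable_states_iterative (initial_states : List String) (transitions : List (String × List (String × List String))) : List String × (List (String × List (String × List String))) :=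
  -- visited = set(); reachable_transitions = {}; stack = list(initial_states); while-loop
  let res := dfsLoopA transitions PySem.Set.empty PySem.Dict.empty initial_states
  (res.1, res.2.items)

-- ===== PORT B =====
-- the recursive visit() helper of B (in Source B each activation is a generator driven by the
-- drive() trampoline, which is exactly this recursion); the Nat argument is fuel, a totality
-- guard only: the recursion depth never exceeds the number of transition keys
def dfsVisitB (transitions : List (String × List (String × List String))) :
    Nat → String →
    PySem.Set String × PySem.Dict String (List (String × List String)) →
    PySem.Set String × PySem.Dict String (List (String × List String))
  | 0, _, acc => acc
  | Nat.succ f, s, (v, rt) =>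
    if PySem.Set.contains v s then (v, rt)
    else
      let v' := PySem.Set.add v s
      match (PySem.Dict.mk transitions).get? s with
      | none => (v', rt)
      | some tr =>
        let rt' := rt.insert s tr
        tr.reverse.foldl
          (fun acc p => p.2.reverse.foldl (fun acc n => dfsVisitB transitions f n acc) acc)
          (v', rt')

def dfs_reachable_states_iterative_alt (initial_states : List String) (transitions : List (String × List (String × List String))) : List String × (List (String × List (String × List String))) :=
  let fuel := initial_states.length + transitions.length
      + (transitions.flatMap (fun p => p.2.flatMap (fun q => q.2))).length + 1
  let res := initial_states.reverse.foldl
    (fun acc s => dfsVisitB transitions fuel s acc) (PySem.Set.empty, PySem.Dict.empty)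
  (res.1, res.2.items)

-- ===== PRECONDITION & SPEC =====
def Spec_dfs_reachable_states_iterative (initial_states : List String) (transitions : List (String × List (String × List String))) (out : List String × (List (String × List (String × List String)))) : Prop := out = dfs_reachable_states_iterative_alt initial_states transitions
instance (initial_states : List String) (transitions : List (String × List (String × List String))) (out : List String × (List (String × List (String × List String)))) : Decidable (Spec_dfs_reachable_states_iterative initial_states transitions out) := by unfold Spec_dfs_reachable_states_iterative; infer_instance

-- ===== CLAIM (what is proved, stated in full; the proofs are below) =====
def Claim_equal_dfs_reachable_states_iterative : Prop := ∀ (initial_states : List String) (transitions : List (String × List (String × List String))), Dom_dfs_reachable_states_iterative initial_states transitions → Spec_dfs_reachable_states_iterative initial_states transitions (dfs_reachable_states_iterative initial_states transitions)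

-- ===== LEMMAS AND PROOFS =====

theorem pv_foldl_prefix {δ β γ : Type} (step : List δ × γ → β → List δ × γ)
    (h : ∀ acc b, acc.1 <+: (step acc b).1) :
    ∀ (l : List β) (acc : List δ × γ), acc.1 <+: (l.foldl step acc).1 := by
  intro l
  induction l with
  | nil => intro acc; exact List.prefix_rfl
  | cons b l ih => intro acc; exact (h acc b).trans (ih (step acc b))

theorem pv_add_prefix (v : PySem.Set String) (s : String) : v <+: PySem.Set.add v s := by
  rw [PySem.Set.add_eq_ite]
  split
  · exact List.prefix_rfl
  · exact List.prefix_append _ _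

theorem pv_visit_prefix (transitions : List (String × List (String × List String))) :
    ∀ (f : Nat) (s : String)
      (acc : PySem.Set String × PySem.Dict String (List (String × List String))),
      acc.1 <+: (dfsVisitB transitions f s acc).1 := by
  intro f
  induction f with
  | zero => intro s acc; exact List.prefix_rfl
  | succ f ih =>
      intro s acc
      obtain ⟨v, rt⟩ := acc
      show v <+: _
      rw [dfsVisitB]
      split
      · exact List.prefix_rfl
      · split
        · exact pv_add_prefix v s
        · rename_i tr heq
          show v <+: (tr.reverse.foldl
            (fun acc p => p.2.reverse.foldl (fun acc n => dfsVisitB transitions f n acc) acc)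
            (PySem.Set.add v s, rt.insert s tr)).1
          exact (pv_add_prefix v s).trans
            (pv_foldl_prefix
              (fun a p => p.2.reverse.foldl (fun a n => dfsVisitB transitions f n a) a)
              (fun a p => pv_foldl_prefix (fun a n => dfsVisitB transitions f n a)
                (fun a n => ih n a) p.2.reverse a)
              tr.reverse (PySem.Set.add v s, rt.insert s tr))

theorem pv_visit_visited (transitions : List (String × List (String × List String)))
    (f : Nat) (s : String)
    (acc : PySem.Set String × PySem.Dict String (List (String × List String)))
    (h : s ∈ acc.1) : dfsVisitB transitions f s acc = acc := by
  cases f with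
  | zero => rfl
  | succ f =>
      obtain ⟨v, rt⟩ := acc
      rw [dfsVisitB]
      rw [if_pos]
      simpa [PySem.Set.contains_eq_listContains, List.contains_eq_mem] using h

theorem pv_loopA_nil (transitions : List (String × List (String × List String)))
    (v : PySem.Set String) (rt : PySem.Dict String (List (String × List String))) :
    dfsLoopA transitions v rt [] = (v, rt) := by
  rw [dfsLoopA]
  split
  · rfl
  · rename_i s h
    simp at h

theorem pv_loopA_visited (transitions : List (String × List (String × List String)))
    (v : PySem.Set String) (rt : PySem.Dict String (List (String × List String)))
    (rest : List String) (s : String) (hc : PySem.Set.contains v s = true) :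
    dfsLoopA transitions v rt (rest ++ [s]) = dfsLoopA transitions v rt rest := by
  rw [dfsLoopA]
  split
  · rename_i h
    rw [List.getLast?_concat] at h
    cases h
  · rename_i s' h
    rw [List.getLast?_concat] at h
    cases h
    simp only [List.dropLast_concat]
    rw [if_pos (by rw [hc])]

theorem pv_loopA_nokey (transitions : List (String × List (String × List String)))
    (v : PySem.Set String) (rt : PySem.Dict String (List (String × List String)))
    (rest : List String) (s : String) (hc : PySem.Set.contains v s = false)
    (hg : (PySem.Dict.mk transitions).get? s = none) :
    dfsLoopA transitions v rt (rest ++ [s])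
      = dfsLoopA transitions (PySem.Set.add v s) rt rest := by
  rw [dfsLoopA]
  split
  · rename_i h
    rw [List.getLast?_concat] at h
    cases h
  · rename_i s' h
    rw [List.getLast?_concat] at h
    cases h
    rw [if_neg (by rw [hc]; simp)]
    split
    · rename_i h2
      rw [hg] at h2
      cases h2
      simp only [List.dropLast_concat]
    · rename_i tr h2
      rw [hg] at h2
      cases h2

theorem pv_loopA_key (transitions : List (String × List (String × List String)))
    (v : PySem.Set String) (rt : PySem.Dict String (List (String × List String)))
    (rest : List String) (s : String) (tr : List (String × List String))
    (hc : PySem.Set.contains v s = false)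
    (hg : (PySem.Dict.mk transitions).get? s = some tr) :
    dfsLoopA transitions v rt (rest ++ [s])
      = dfsLoopA transitions (PySem.Set.add v s) (rt.insert s tr)
          (rest ++ (tr.flatMap (fun p => p.2)).filter
            (fun n => !(PySem.Set.contains (PySem.Set.add v s) n))) := by
  rw [dfsLoopA]
  split
  · rename_i h
    rw [List.getLast?_concat] at h
    cases h
  · rename_i s' h
    rw [List.getLast?_concat] at h
    cases h
    rw [if_neg (by rw [hc]; simp)]
    split
    · rename_i h2
      rw [hg] at h2
      cases h2
    · rename_i tr' h2
      rw [hg] at h2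
      cases h2
      simp only [List.dropLast_concat, pv_push_eq]

theorem pv_fold_flatten (transitions : List (String × List (String × List String))) (f : Nat) :
    ∀ (tr : List (String × List String))
      (a0 : PySem.Set String × PySem.Dict String (List (String × List String))),
      tr.reverse.foldl
          (fun acc p => p.2.reverse.foldl (fun acc n => dfsVisitB transitions f n acc) acc) a0
        = ((tr.flatMap (fun p => p.2)).reverse).foldl
            (fun acc n => dfsVisitB transitions f n acc) a0 := by
  intro tr
  induction tr with
  | nil => intro a0; rfl
  | cons p tr ih =>
      intro a0
      rw [List.reverse_cons, List.foldl_append, ih, List.flatMap_cons, List.reverse_append,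
        List.foldl_append]
      rfl

theorem pv_mem_of_prefix {l l' : List String} (h : l <+: l') (x : String) (hx : x ∈ l) :
    x ∈ l' := h.subset hx

theorem pv_chain (transitions : List (String × List (String × List String))) (f : Nat)
    (ih : ∀ (v : PySem.Set String) (rt : PySem.Dict String (List (String × List String)))
      (rest : List String) (s : String), pvUnv transitions v < f →
      dfsLoopA transitions v rt (rest ++ [s])
        = dfsLoopA transitions (dfsVisitB transitions f s (v, rt)).1
            (dfsVisitB transitions f s (v, rt)).2 rest)
    (v' : PySem.Set String) :
    ∀ (cs : List String) (rest : List String)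
      (acc : PySem.Set String × PySem.Dict String (List (String × List String))),
      pvUnv transitions acc.1 < f → (∀ x, x ∈ v' → x ∈ acc.1) →
      dfsLoopA transitions acc.1 acc.2
          (rest ++ cs.filter (fun n => !(PySem.Set.contains v' n)))
        = dfsLoopA transitions
            (cs.reverse.foldl (fun a n => dfsVisitB transitions f n a) acc).1
            (cs.reverse.foldl (fun a n => dfsVisitB transitions f n a) acc).2 rest := by
  intro cs
  induction cs using List.reverseRecOn with
  | nil => intro rest acc _ _; simp
  | append_singleton cs c ihcs =>
      intro rest acc hunv hsub
      rw [List.reverse_append, List.reverse_singleton, List.filter_append]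
      cases hvc : PySem.Set.contains v' c
      · -- c not yet visited when it was pushed: it is on the stack
        have hd : decide (c ∈ v') = false := by
          simpa [PySem.Set.contains_eq_listContains, List.contains_eq_mem] using hvc
        have hfil : List.filter (fun n => !(PySem.Set.contains v' n)) [c] = [c] := by
          simp [hd]
        rw [hfil, ← List.append_assoc,
          ih acc.1 acc.2 (rest ++ List.filter (fun n => !(PySem.Set.contains v' n)) cs) c hunv]
        simp only [Prod.mk.eta]
        have hpre := pv_visit_prefix transitions f c acc
        have hunv' : pvUnv transitions (dfsVisitB transitions f c acc).1 < f :=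
          lt_of_le_of_lt (pvUnv_le_of_subset transitions acc.1 _
            (fun x hx => pv_mem_of_prefix hpre x hx)) hunv
        have hsub' : ∀ x, x ∈ v' → x ∈ (dfsVisitB transitions f c acc).1 :=
          fun x hx => pv_mem_of_prefix hpre x (hsub x hx)
        rw [List.singleton_append, List.foldl_cons]
        exact ihcs rest (dfsVisitB transitions f c acc) hunv' hsub'
      · -- c was already visited when A considered pushing it: it never went on the stack
        have hd : decide (c ∈ v') = true := by
          simpa [PySem.Set.contains_eq_listContains, List.contains_eq_mem] using hvc
        have hfil : List.filter (fun n => !(PySem.Set.contains v' n)) [c] = [] := by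
          simp [hd]
        have hmem : c ∈ acc.1 := hsub c (by simpa using hd)
        rw [hfil, List.append_nil, List.singleton_append, List.foldl_cons,
          pv_visit_visited transitions f c acc hmem]
        exact ihcs rest acc hunv hsub

theorem pv_bridge (transitions : List (String × List (String × List String))) :
    ∀ (f : Nat) (v : PySem.Set String) (rt : PySem.Dict String (List (String × List String)))
      (rest : List String) (s : String),
      pvUnv transitions v < f →
      dfsLoopA transitions v rt (rest ++ [s])
        = dfsLoopA transitions (dfsVisitB transitions f s (v, rt)).1
            (dfsVisitB transitions f s (v, rt)).2 rest := by
  intro f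
  induction f with
  | zero => intro v rt rest s h; exact absurd h (Nat.not_lt_zero _)
  | succ f ih =>
      intro v rt rest s hf
      cases hc : PySem.Set.contains v s
      · -- state not yet visited
        cases hg : (PySem.Dict.mk transitions).get? s
        · -- no outgoing transitions recorded for it
          rw [pv_loopA_nokey transitions v rt rest s hc hg]
          have hv : dfsVisitB transitions (f + 1) s (v, rt) = (PySem.Set.add v s, rt) := by
            rw [dfsVisitB, if_neg (by rw [hc]; simp), hg]
          rw [hv]
        · rename_i tr
          rw [pv_loopA_key transitions v rt rest s tr hc hg]
          have hv : dfsVisitB transitions (f + 1) s (v, rt)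
              = tr.reverse.foldl (fun acc p => p.2.reverse.foldl
                  (fun acc n => dfsVisitB transitions f n acc) acc)
                  (PySem.Set.add v s, rt.insert s tr) := by
            rw [dfsVisitB, if_neg (by rw [hc]; simp), hg]
          rw [hv, pv_fold_flatten]
          obtain ⟨hk, _⟩ := pv_key_mem s transitions tr hg
          have hlt := pvUnv_add_lt transitions v s hc hk
          have hunv' : pvUnv transitions (PySem.Set.add v s) < f := by omega
          exact pv_chain transitions f ih (PySem.Set.add v s)
            (tr.flatMap (fun p => p.2)) rest (PySem.Set.add v s, rt.insert s tr)
            hunv' (fun x hx => hx)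
      · -- state already visited: pop and skip
        have hv : dfsVisitB transitions (f + 1) s (v, rt) = (v, rt) := by
          rw [dfsVisitB, if_pos (by rw [hc])]
        rw [hv]
        exact pv_loopA_visited transitions v rt rest s hc

theorem pv_top (transitions : List (String × List (String × List String))) (fuel : Nat) :
    ∀ (l : List String)
      (acc : PySem.Set String × PySem.Dict String (List (String × List String))),
      pvUnv transitions acc.1 < fuel →
      dfsLoopA transitions acc.1 acc.2 l
        = l.reverse.foldl (fun acc s => dfsVisitB transitions fuel s acc) acc := by
  intro l
  induction l using List.reverseRecOn with
  | nil => intro acc _; exact pv_loopA_nil transitions acc.1 acc.2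
  | append_singleton l s ihl =>
      intro acc hunv
      have hb := pv_bridge transitions fuel acc.1 acc.2 l s hunv
      have hacc : (acc.1, acc.2) = acc := rfl
      rw [hacc] at hb
      rw [hb]
      have hpre := pv_visit_prefix transitions fuel s acc
      have hunv' : pvUnv transitions (dfsVisitB transitions fuel s acc).1 < fuel :=
        lt_of_le_of_lt (pvUnv_le_of_subset transitions acc.1 _
          (fun x hx => pv_mem_of_prefix hpre x hx)) hunv
      rw [ihl (dfsVisitB transitions fuel s acc) hunv']
      rw [List.reverse_append, List.reverse_singleton, List.singleton_append, List.foldl_cons]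

-- ===== VERDICT (by name: the statement is the Claim_ definition above) =====
theorem dfs_reachable_states_iterative_spec : Claim_equal_dfs_reachable_states_iterative := by
  intro initial_states transitions _
  unfold Spec_dfs_reachable_states_iterative
  unfold dfs_reachable_states_iterative dfs_reachable_states_iterative_alt
  have hunv : pvUnv transitions (PySem.Set.empty : PySem.Set String)
      < initial_states.length + transitions.length
        + (transitions.flatMap (fun p => p.2.flatMap (fun q => q.2))).length + 1 := by
    have h1 := List.length_filter_le
      (fun k => !(PySem.Set.contains (PySem.Set.empty : PySem.Set String) k))
      (transitions.map (fun p => p.1))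
    have h2 := List.length_map (f := fun p : String × List (String × List String) => p.1)
      (as := transitions)
    unfold pvUnv
    omega
  rw [pv_top transitions _ initial_states (PySem.Set.empty, PySem.Dict.empty) hunv]
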